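-- pv_equiv track=rewrite | github.com/Praveerpratap2803/semantic_search_engine_web_application | preprocessing.py | sentence_segmentation
-- ===== SOURCE A (Python) =====
-- def sentence_segmentation(text):
--     sentences = []
--     current = ""
--
--     for ch in text:
--         current += ch
--         if ch in ".!?":
--             sentences.append(current.strip())
--             current = ""
--
--     if current.strip():
--         sentences.append(current.strip())
--
--     return sentences
-- ===== SOURCE B (Python) =====
-- def sentence_segmentation(text):
--     # Phase 1: tokenize into alternating [chunk, delim, chunk, ..., chunk] (chunks as char lists)
--     tokens = [[]]
--     for ch in text:
--         if ch in ".!?":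
--             tokens.append([ch])
--             tokens.append([])
--         else:
--             tokens[-1].append(ch)
--     # Phase 2: pair chunk+delimiter, strip each; tail only if non-empty after strip
--     sentences = [''.join(tokens[i] + tokens[i + 1]).strip() for i in range(0, len(tokens) - 1, 2)]
--     tail = ''.join(tokens[-1]).strip()
--     if tail:
--         sentences.append(tail)
--     return sentences
-- ===== Notes on version B (the rewrite author's own statement) =====
-- stated objective: alternative
-- what changed: B first tokenizes the text into an alternating chunk/delimiter list and then builds the sentences in a second pass by pairing each chunk with its delimiter, instead of A's single pass that emits while accumulating a current string.
import Mathlib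
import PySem

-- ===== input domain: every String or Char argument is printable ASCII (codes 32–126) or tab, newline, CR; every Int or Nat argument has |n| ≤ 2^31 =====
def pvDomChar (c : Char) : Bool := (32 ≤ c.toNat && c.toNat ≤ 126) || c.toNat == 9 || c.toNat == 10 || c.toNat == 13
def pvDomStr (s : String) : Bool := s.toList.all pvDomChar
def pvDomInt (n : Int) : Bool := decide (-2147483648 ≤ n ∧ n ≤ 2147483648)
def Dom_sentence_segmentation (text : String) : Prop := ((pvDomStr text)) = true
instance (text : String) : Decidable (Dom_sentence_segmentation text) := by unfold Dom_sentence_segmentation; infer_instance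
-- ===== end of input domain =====

-- B replaces A's single emit-while-accumulating pass by a tokenize-then-pair two-phase
-- decomposition (objective: alternative; same asymptotic cost).

-- shared helper: `ch in ".!?"`
def pvDelim (c : Char) : Bool := ['.', '!', '?'].contains c

-- ===== PORT A =====
-- A's loop state: (sentences so far, current); one step of the for-loop.
def pvStepA (st : List String × List Char) (c : Char) : List String × List Char :=
  let cur := st.2 ++ [c]
  if pvDelim c then (st.1 ++ [String.ofList (PySem.Chars.strip cur)], [])
  else (st.1, cur)

def sentence_segmentation (text : String) : List String :=
  let st := text.toList.foldl pvStepA ([], [])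
  if PySem.Chars.strip st.2 ≠ [] then st.1 ++ [String.ofList (PySem.Chars.strip st.2)]
  else st.1

-- ===== PORT B =====
-- phase 1: one step of the tokenizing loop (tokens[-1] += ch, or append delim and fresh chunk)
def pvStepB (toks : List (List Char)) (c : Char) : List (List Char) :=
  if pvDelim c then toks ++ [[c], []]
  else toks.dropLast ++ [toks.getLastD [] ++ [c]]

-- phase 2: the comprehension over i = 0,2,… plus the tail test
def pvPairUp : List (List Char) → List String
  | [] => []
  | [t] =>
    let s := PySem.Chars.strip t
    if s ≠ [] then [String.ofList s] else []
  | a :: b :: rest => String.ofList (PySem.Chars.strip (a ++ b)) :: pvPairUp rest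

def sentence_segmentation_alt (text : String) : List String :=
  pvPairUp (text.toList.foldl pvStepB [[]])

-- ===== PRECONDITION & SPEC =====
def Spec_sentence_segmentation (text : String) (out : List String) : Prop := out = sentence_segmentation_alt text
instance (text : String) (out : List String) : Decidable (Spec_sentence_segmentation text out) := by unfold Spec_sentence_segmentation; infer_instance

-- ===== CLAIM (what is proved, stated in full; the proofs are below) =====
def Claim_equal_sentence_segmentation : Prop := ∀ (text : String), Dom_sentence_segmentation text → Spec_sentence_segmentation text (sentence_segmentation text)

-- ===== LEMMAS AND PROOFS =====

-- getLastD over a completed prefix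
lemma pvGetLastD_append (pre ts : List (List Char)) (h : ts ≠ []) :
    (pre ++ ts).getLastD [] = ts.getLastD [] := by
  cases ts with
  | nil => exact absurd rfl h
  | cons a t =>
    obtain ⟨x, hx⟩ := Option.isSome_iff_exists.mp
      (show (a :: t).getLast?.isSome by simp [List.getLast?_isSome])
    simp [List.getLastD_eq_getLast?, hx]

-- B's token loop only ever touches the last token: a prefix of completed tokens factors out.
lemma foldl_stepB_append (cs : List Char) :
    ∀ (pre ts : List (List Char)), ts ≠ [] →
      cs.foldl pvStepB (pre ++ ts) = pre ++ cs.foldl pvStepB ts := by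
  induction cs with
  | nil => intro pre ts _; simp
  | cons c cs ih =>
    intro pre ts hts
    simp only [List.foldl_cons, pvStepB]
    by_cases h : pvDelim c
    · simp only [h, if_pos]
      rw [List.append_assoc]
      exact ih pre (ts ++ [[c], []]) (by simp)
    · simp only [h, if_neg, Bool.false_eq_true, not_false_iff]
      rw [List.dropLast_append_of_ne_nil hts, pvGetLastD_append pre ts hts,
        List.append_assoc]
      exact ih pre (ts.dropLast ++ [ts.getLastD [] ++ [c]]) (by simp)

-- the A-side finish step
def pvFinishA (st : List String × List Char) : List String :=
  if PySem.Chars.strip st.2 ≠ [] then st.1 ++ [String.ofList (PySem.Chars.strip st.2)]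
  else st.1

-- Main invariant: A's finished fold from (acc, cur) equals acc ++ B's pairing of the fold from [cur].
lemma main_inv (cs : List Char) :
    ∀ (acc : List String) (cur : List Char),
      pvFinishA (cs.foldl pvStepA (acc, cur)) = acc ++ pvPairUp (cs.foldl pvStepB [cur]) := by
  induction cs with
  | nil =>
    intro acc cur
    simp only [List.foldl_nil, pvFinishA, pvPairUp]
    split_ifs <;> simp_all
  | cons c cs ih =>
    intro acc cur
    simp only [List.foldl_cons, pvStepA, pvStepB]
    by_cases h : pvDelim c
    · simp only [h, if_pos]
      rw [ih, show ([cur] ++ [[c], []] : List (List Char)) = [cur, [c]] ++ [[]] by rfl,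
        foldl_stepB_append cs [cur, [c]] [[]] (by simp)]
      simp [pvPairUp]
    · simp only [h, if_neg, Bool.false_eq_true, not_false_iff]
      rw [ih]
      rfl

-- ===== VERDICT (by name: the statement is the Claim_ definition above) =====
theorem sentence_segmentation_spec : Claim_equal_sentence_segmentation := by
  intro text _
  show sentence_segmentation text = sentence_segmentation_alt text
  have := main_inv text.toList [] []
  simpa [sentence_segmentation, sentence_segmentation_alt, pvFinishA] using this
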